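-- pv_equiv track=rewrite | github.com/FelipeMorandini/md2pydantic | src/md2pydantic/parser.py | _has_pipe
-- ===== SOURCE A (Python) =====
-- def _has_pipe(line: str) -> bool:
--     """Check if a line contains an unescaped pipe character."""
--     stripped = line.strip()
--     if not stripped:
--         return False
--     # Check for unescaped pipes
--     i = 0
--     while i < len(stripped):
--         if stripped[i] == "\\" and i + 1 < len(stripped):
--             i += 2  # Skip escaped character
--             continue
--         if stripped[i] == "|":
--             return True
--         i += 1
--     return False
-- ===== SOURCE B (Python) =====
-- import re
--
-- def _has_pipe(line: str) -> bool:
--     """Check if a line contains an unescaped pipe character."""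
--     return "|" in re.sub(r"\\.", "", line.strip(), flags=re.DOTALL)
-- ===== Notes on version B (the rewrite author's own statement) =====
-- stated objective: idiomatic
-- what changed: Replaced the manual index-jumping while loop with a regex re.sub deleting every backslash-escape pair followed by a plain pipe-membership test on the remainder.
import Mathlib
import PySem

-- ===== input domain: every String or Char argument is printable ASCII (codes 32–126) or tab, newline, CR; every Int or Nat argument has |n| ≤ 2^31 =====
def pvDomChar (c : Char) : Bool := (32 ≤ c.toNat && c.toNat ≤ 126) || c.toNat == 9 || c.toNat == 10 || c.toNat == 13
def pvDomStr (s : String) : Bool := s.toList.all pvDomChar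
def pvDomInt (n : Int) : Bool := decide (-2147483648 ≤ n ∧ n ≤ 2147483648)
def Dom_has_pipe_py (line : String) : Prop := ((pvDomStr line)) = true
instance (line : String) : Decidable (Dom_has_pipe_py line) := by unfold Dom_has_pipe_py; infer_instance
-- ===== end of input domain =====

-- B: idiomatic rewrite — delete every backslash-escape pair, then test '|' membership (same cost, plainer).

-- ===== PORT A =====
-- A's while loop over index i (terminates: i increases towards cs.length)
def hasPipeLoop (cs : List Char) (i : Nat) : Bool :=
  if h : i < cs.length then
    if cs[i] = '\\' ∧ i + 1 < cs.length then hasPipeLoop cs (i + 2)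
    else if cs[i] = '|' then true
    else hasPipeLoop cs (i + 1)
  else false
termination_by cs.length - i

def has_pipe_py (line : String) : Bool :=
  let stripped := PySem.Str.strip line
  if stripped = "" then false
  else hasPipeLoop stripped.toList 0

-- ===== PORT B =====
-- hand port of re.sub(r"\\.", "", s, flags=re.DOTALL): exact — deletes each backslash plus the
-- following character, scanning left to right (a trailing lone backslash stays)
def removeEscapes : List Char → List Char
  | '\\' :: _ :: rest => removeEscapes rest
  | c :: rest => c :: removeEscapes rest
  | [] => []

def has_pipe_py_alt (line : String) : Bool :=
  (removeEscapes (PySem.Str.strip line).toList).contains '|'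

-- ===== PRECONDITION & SPEC =====
def Spec_has_pipe_py (line : String) (out : Bool) : Prop := out = has_pipe_py_alt line
instance (line : String) (out : Bool) : Decidable (Spec_has_pipe_py line out) := by unfold Spec_has_pipe_py; infer_instance

-- ===== CLAIM (what is proved, stated in full; the proofs are below) =====
def Claim_equal_has_pipe_py : Prop := ∀ (line : String), Dom_has_pipe_py line → Spec_has_pipe_py line (has_pipe_py line)

-- ===== LEMMAS AND PROOFS =====
-- scanA: direct-recursion reading of A's loop on the suffix starting at the current index
def scanA : List Char → Bool
  | '\\' :: _ :: rest => scanA rest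
  | c :: rest => if c = '|' then true else scanA rest
  | [] => false

lemma scanA_cons (c : Char) (rest : List Char) (h : c ≠ '\\' ∨ rest = []) :
    scanA (c :: rest) = if c = '|' then true else scanA rest := by
  rcases rest with _ | ⟨d, ds⟩
  · simp [scanA]
  · rcases h with h | h
    · simp [scanA, h]
    · simp at h

lemma drop_cons_of_lt (cs : List Char) (i : Nat) (h : i < cs.length) :
    cs.drop i = cs[i] :: cs.drop (i + 1) := by
  rw [List.drop_eq_getElem_cons h]

lemma hasPipeLoop_eq_scanA (cs : List Char) (i : Nat) :
    hasPipeLoop cs i = scanA (cs.drop i) := by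
  induction i using hasPipeLoop.induct (cs := cs) with
  | case1 x h h2 ih =>
    have e : cs.drop x = '\\' :: cs[x+1] :: cs.drop (x+2) := by
      rw [drop_cons_of_lt cs x h, drop_cons_of_lt cs (x+1) h2.2]; simp [h2.1]
    rw [hasPipeLoop, dif_pos h, if_pos h2, e]
    exact ih
  | case2 x h h2 h3 =>
    rw [hasPipeLoop, dif_pos h, if_neg h2, if_pos h3, drop_cons_of_lt cs x h, h3,
        scanA_cons _ _ (Or.inl (by decide))]
    simp
  | case3 x h h2 h3 ih =>
    have hs : cs[x] ≠ '\\' ∨ cs.drop (x+1) = [] := by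
      by_cases hb : cs[x] = '\\'
      · right
        exact List.drop_eq_nil_of_le (by by_contra hc; exact h2 ⟨hb, by omega⟩)
      · exact Or.inl hb
    rw [hasPipeLoop, dif_pos h, if_neg h2, if_neg h3, drop_cons_of_lt cs x h,
        scanA_cons _ _ hs, if_neg h3]
    exact ih
  | case4 x h =>
    rw [hasPipeLoop, dif_neg h, List.drop_eq_nil_of_le (by omega)]
    rfl

lemma removeEscapes_cons (c : Char) (rest : List Char) (h : c ≠ '\\' ∨ rest = []) :
    removeEscapes (c :: rest) = c :: removeEscapes rest := by
  rcases rest with _ | ⟨d, ds⟩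
  · simp [removeEscapes]
  · rcases h with h | h
    · simp [removeEscapes, h]
    · simp at h

lemma scanA_eq_contains (cs : List Char) :
    scanA cs = (removeEscapes cs).contains '|' := by
  induction cs using removeEscapes.induct with
  | case1 head rest ih =>
    show scanA rest = (removeEscapes ('\\' :: head :: rest)).contains '|'
    rw [ih]; rfl
  | case2 c rest hne ih =>
    have h : c ≠ '\\' ∨ rest = [] := by
      rcases rest with _ | ⟨d, ds⟩
      · exact Or.inr rfl
      · exact Or.inl (fun hc => hne d ds hc rfl)
    rw [scanA_cons c rest h, removeEscapes_cons c rest h, ih]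
    by_cases hp : c = '|' <;> simp [hp, eq_comm]
  | case3 => rfl

-- ===== VERDICT (by name: the statement is the Claim_ definition above) =====
theorem has_pipe_py_spec : Claim_equal_has_pipe_py := by
  intro line _
  unfold Spec_has_pipe_py has_pipe_py has_pipe_py_alt
  by_cases h : PySem.Str.strip line = ""
  · simp only [h]
    rfl
  · simp only [if_neg h]
    rw [hasPipeLoop_eq_scanA, List.drop_zero, scanA_eq_contains]
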